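-- pv_equiv track=rewrite | github.com/deepgram-devs/docs-sample-testing | languages/python/executor.py | _wrap_executable_code
-- ===== SOURCE A (Python) =====
-- def _wrap_executable_code(code: str) -> str:
--     """Wrap executable code, keeping function/class definitions at module level"""
--     lines = code.split('\n')
--     definitions = []
--     executable_lines = []
--
--     i = 0
--     while i < len(lines):
--         line = lines[i]
--         stripped = line.strip()
--
--         if (stripped.startswith('def ') or stripped.startswith('class ')) and not line.startswith(' '):
--             # This is a top-level function or class definition
--             def_lines = [line]
--             i += 1
--
--             # Collect all lines that belong to this definition
--             while i < len(lines) and (lines[i].startswith(' ') or not lines[i].strip()):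
--                 def_lines.append(lines[i])
--                 i += 1
--
--             definitions.extend(def_lines)
--             continue
--         elif stripped and not stripped.startswith('#') and not stripped.startswith('import') and not stripped.startswith('from '):
--             # This looks like executable code
--             executable_lines.append(line)
--         else:
--             # Comments, imports, empty lines - add to definitions (they go at module level)
--             if stripped.startswith('import') or stripped.startswith('from ') or not stripped:
--                 definitions.append(line)
--             else:
--                 executable_lines.append(line)
--
--         i += 1
--
--     # Combine: definitions at module level, executable code in main call
--     result = '\n'.join(definitions)
--     if executable_lines:
--         if result.strip():
--             result += '\n\n'
--         result += '# Execute the main logic\n'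
--         result += '\n'.join(executable_lines)
--
--     return result
-- ===== SOURCE B (Python) =====
-- def _wrap_executable_code(code: str) -> str:
--     """Wrap executable code, keeping function/class definitions at module level"""
--     definitions = []
--     executable_lines = []
--     in_definition = False
--
--     for line in code.split('\n'):
--         stripped = line.strip()
--         if in_definition:
--             if line.startswith(' ') or not stripped:
--                 definitions.append(line)
--                 continue
--             in_definition = False
--         if (stripped.startswith('def ') or stripped.startswith('class ')) and not line.startswith(' '):
--             in_definition = True
--             definitions.append(line)
--         elif not stripped or stripped.startswith('import') or stripped.startswith('from '):
--             definitions.append(line)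
--         else:
--             executable_lines.append(line)
--
--     result = '\n'.join(definitions)
--     if executable_lines:
--         if result.strip():
--             result += '\n\n'
--         result += '# Execute the main logic\n'
--         result += '\n'.join(executable_lines)
--
--     return result
-- ===== Notes on version B (the rewrite author's own statement) =====
-- stated objective: simpler
-- what changed: Replaces the manual index counter and nested inner while-loop with a single flat for-loop carrying an in_definition flag, and collapses A's redundant two-stage classification (an elif plus an else with its own inner if) into one three-way branch.
import Mathlib
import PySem

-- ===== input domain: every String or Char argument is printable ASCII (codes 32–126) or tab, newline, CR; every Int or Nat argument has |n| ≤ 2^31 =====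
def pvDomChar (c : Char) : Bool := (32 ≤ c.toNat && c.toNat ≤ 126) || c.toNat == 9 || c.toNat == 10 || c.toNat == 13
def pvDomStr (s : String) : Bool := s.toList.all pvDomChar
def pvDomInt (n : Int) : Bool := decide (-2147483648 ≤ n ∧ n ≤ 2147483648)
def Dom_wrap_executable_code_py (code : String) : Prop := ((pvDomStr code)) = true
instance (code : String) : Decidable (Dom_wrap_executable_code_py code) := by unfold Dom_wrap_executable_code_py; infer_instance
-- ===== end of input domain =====

-- B replaces A's manual index with a nested inner while-loop by a single flat
-- fold carrying an in_definition flag and one three-way classification (simpler).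


-- ===== PORT A =====
-- inner while condition: lines[i].startswith(' ') or not lines[i].strip()
def pvDefCont (l : String) : Bool :=
  PySem.Str.startswith l " " || (PySem.Str.strip l == "")

-- the outer while loop: state (definitions, executable_lines); the inner
-- while is transliterated as takeWhile/dropWhile of the same condition
def pvALoop : List String → List String → List String → List String × List String
  | [], defs, execs => (defs, execs)
  | line :: rest, defs, execs =>
    let stripped := PySem.Str.strip line
    if (PySem.Str.startswith stripped "def " || PySem.Str.startswith stripped "class ")
        && !PySem.Str.startswith line " " then
      let def_lines := line :: rest.takeWhile pvDefCont
      pvALoop (rest.dropWhile pvDefCont) (defs ++ def_lines) execs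
    else if stripped != "" && !PySem.Str.startswith stripped "#"
        && !PySem.Str.startswith stripped "import" && !PySem.Str.startswith stripped "from " then
      pvALoop rest defs (execs ++ [line])
    else
      if PySem.Str.startswith stripped "import" || PySem.Str.startswith stripped "from "
          || stripped == "" then
        pvALoop rest (defs ++ [line]) execs
      else
        pvALoop rest defs (execs ++ [line])
  termination_by l _ _ => l.length
  decreasing_by
  · simpa using Nat.lt_succ_of_le (List.length_dropWhile_le pvDefCont rest)
  · simp
  · simp
  · simp

def wrap_executable_code_py (code : String) : String :=
  let lines := (PySem.Str.split? code "\n").getD []   -- sep "\n" ≠ "": split? never none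
  let de := pvALoop lines [] []
  let result := PySem.Str.join "\n" de.1
  if de.2 ≠ [] then
    (if PySem.Str.strip result != "" then result ++ "\n\n" else result)
      ++ "# Execute the main logic\n" ++ PySem.Str.join "\n" de.2
  else result

-- ===== PORT B =====
-- one flat pass: state (in_definition, definitions, executable_lines)
def pvBStep (s : Bool × List String × List String) (line : String) :
    Bool × List String × List String :=
  let stripped := PySem.Str.strip line
  if s.1 && (PySem.Str.startswith line " " || stripped == "") then
    (true, s.2.1 ++ [line], s.2.2)
  else if (PySem.Str.startswith stripped "def " || PySem.Str.startswith stripped "class ")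
      && !PySem.Str.startswith line " " then
    (true, s.2.1 ++ [line], s.2.2)
  else if stripped == "" || PySem.Str.startswith stripped "import"
      || PySem.Str.startswith stripped "from " then
    (false, s.2.1 ++ [line], s.2.2)
  else
    (false, s.2.1, s.2.2 ++ [line])

def wrap_executable_code_py_alt (code : String) : String :=
  let lines := (PySem.Str.split? code "\n").getD []
  let st := lines.foldl pvBStep (false, [], [])
  let result := PySem.Str.join "\n" st.2.1
  if st.2.2 ≠ [] then
    (if PySem.Str.strip result != "" then result ++ "\n\n" else result)
      ++ "# Execute the main logic\n" ++ PySem.Str.join "\n" st.2.2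
  else result

-- ===== PRECONDITION & SPEC =====
def Spec_wrap_executable_code_py (code : String) (out : String) : Prop := out = wrap_executable_code_py_alt code
instance (code : String) (out : String) : Decidable (Spec_wrap_executable_code_py code out) := by unfold Spec_wrap_executable_code_py; infer_instance

-- ===== CLAIM (what is proved, stated in full; the proofs are below) =====
def Claim_equal_wrap_executable_code_py : Prop := ∀ (code : String), Dom_wrap_executable_code_py code → Spec_wrap_executable_code_py code (wrap_executable_code_py code)

-- ===== LEMMAS AND PROOFS =====

lemma pvStep_true_cont {line : String} (defs execs : List String)
    (hc : pvDefCont line = true) :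
    pvBStep (true, defs, execs) line = (true, defs ++ [line], execs) := by
  unfold pvDefCont at hc
  simp only [pvBStep, Bool.true_and, hc, if_pos]

lemma pvStep_true_stop {line : String} (defs execs : List String)
    (hc : pvDefCont line = false) :
    pvBStep (true, defs, execs) line = pvBStep (false, defs, execs) line := by
  unfold pvDefCont at hc
  simp only [pvBStep, Bool.true_and, Bool.false_and, hc]

-- B with the flag raised consumes exactly the span A's inner while consumes
lemma pvB_flag_span (l : List String) (defs execs : List String) :
    (l.foldl pvBStep (true, defs, execs)).2 =
      ((l.dropWhile pvDefCont).foldl pvBStep (false, defs ++ l.takeWhile pvDefCont, execs)).2 := by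
  induction l generalizing defs with
  | nil => simp
  | cons h t ih =>
    cases hc : pvDefCont h with
    | true =>
      rw [List.foldl_cons, pvStep_true_cont defs execs hc, ih,
        List.takeWhile_cons_of_pos hc, List.dropWhile_cons_of_pos hc]
      simp only [List.append_assoc, List.singleton_append]
    | false =>
      rw [List.foldl_cons, pvStep_true_stop defs execs hc,
        List.takeWhile_cons_of_neg (by simp [hc]), List.dropWhile_cons_of_neg (by simp [hc]),
        List.append_nil, List.foldl_cons]

lemma pvStep_false_def {line : String} (defs execs : List String)
    (h1 : ((PySem.Str.startswith (PySem.Str.strip line) "def "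
        || PySem.Str.startswith (PySem.Str.strip line) "class ")
        && !PySem.Str.startswith line " ") = true) :
    pvBStep (false, defs, execs) line = (true, defs ++ [line], execs) := by
  simp only [pvBStep]
  rw [Bool.false_and, if_neg Bool.false_ne_true, h1, if_pos rfl]

lemma pvStep_false_defmod {line : String} (defs execs : List String)
    (h1 : ((PySem.Str.startswith (PySem.Str.strip line) "def "
        || PySem.Str.startswith (PySem.Str.strip line) "class ")
        && !PySem.Str.startswith line " ") = false) :
    pvBStep (false, defs, execs) line =
      (if (PySem.Str.strip line == "" || PySem.Str.startswith (PySem.Str.strip line) "import"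
          || PySem.Str.startswith (PySem.Str.strip line) "from ") = true then
        (false, defs ++ [line], execs)
      else (false, defs, execs ++ [line])) := by
  simp only [pvBStep]
  rw [Bool.false_and, if_neg Bool.false_ne_true, h1, if_neg Bool.false_ne_true]

-- A's outer loop equals B's fold (flag down), for every accumulator state
set_option maxHeartbeats 1000000 in
lemma pvALoop_eq_foldl (l : List String) (defs execs : List String) :
    pvALoop l defs execs = (l.foldl pvBStep (false, defs, execs)).2 := by
  induction l, defs, execs using pvALoop.induct with
  | case1 defs execs => simp [pvALoop]
  | case2 line rest defs execs stripped hcond dl ih =>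
    have hsl : stripped = PySem.Str.strip line := rfl
    rw [hsl] at hcond
    rw [pvALoop]
    rw [if_pos hcond]
    rw [List.foldl_cons, pvStep_false_def defs execs hcond, pvB_flag_span,
      show defs ++ [line] ++ List.takeWhile pvDefCont rest = defs ++ dl by
        simp only [List.append_assoc, List.singleton_append]; rfl, ih]
  | case3 line rest defs execs stripped hns hc ih =>
    have hsl : stripped = PySem.Str.strip line := rfl
    rw [hsl] at hns hc
    have h1 := Bool.eq_false_iff.mpr hns
    obtain ⟨⟨⟨ha, hh⟩, hi⟩, hf⟩ := by simpa only [Bool.and_eq_true] using hc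
    have hnc : ¬ ((PySem.Str.strip line == "" || PySem.Str.startswith (PySem.Str.strip line) "import"
        || PySem.Str.startswith (PySem.Str.strip line) "from ") = true) := by
      intro hx
      rcases by simpa only [Bool.or_eq_true] using hx with (hx | hx) | hx
      · exact bne_iff_ne.mp ha (beq_iff_eq.mp hx)
      · simp only [Bool.not_eq_true'] at hi; rw [hi] at hx; exact Bool.false_ne_true hx
      · simp only [Bool.not_eq_true'] at hf; rw [hf] at hx; exact Bool.false_ne_true hx
    rw [pvALoop, if_neg hns, if_pos hc]
    rw [List.foldl_cons, pvStep_false_defmod defs execs h1, if_neg hnc, ih]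
  | case4 line rest defs execs stripped hns1 hns2 hc ih =>
    have hsl : stripped = PySem.Str.strip line := rfl
    rw [hsl] at hns1 hns2 hc
    have h1 := Bool.eq_false_iff.mpr hns1
    have hcnd : (PySem.Str.strip line == "" || PySem.Str.startswith (PySem.Str.strip line) "import"
        || PySem.Str.startswith (PySem.Str.strip line) "from ") = true := by
      have h := by simpa only [Bool.or_eq_true] using hc
      simp only [Bool.or_eq_true]
      rcases h with (h | h) | h
      · exact Or.inl (Or.inr h)
      · exact Or.inr h
      · exact Or.inl (Or.inl h)
    rw [pvALoop, if_neg hns1, if_neg hns2, if_pos hc]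
    rw [List.foldl_cons, pvStep_false_defmod defs execs h1, if_pos hcnd, ih]
  | case5 line rest defs execs stripped hns1 hns2 hns3 ih =>
    have hsl : stripped = PySem.Str.strip line := rfl
    rw [hsl] at hns1 hns2 hns3
    have h1 := Bool.eq_false_iff.mpr hns1
    have hcnd : ¬ ((PySem.Str.strip line == "" || PySem.Str.startswith (PySem.Str.strip line) "import"
        || PySem.Str.startswith (PySem.Str.strip line) "from ") = true) := by
      intro hx
      apply hns3
      have h := by simpa only [Bool.or_eq_true] using hx
      simp only [Bool.or_eq_true]
      rcases h with (h | h) | h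
      · exact Or.inr h
      · exact Or.inl (Or.inl h)
      · exact Or.inl (Or.inr h)
    rw [pvALoop, if_neg hns1, if_neg hns2, if_neg hns3]
    rw [List.foldl_cons, pvStep_false_defmod defs execs h1, if_neg hcnd, ih]

-- ===== VERDICT (by name: the statement is the Claim_ definition above) =====
theorem wrap_executable_code_py_spec : Claim_equal_wrap_executable_code_py := by
  intro code _
  unfold Spec_wrap_executable_code_py wrap_executable_code_py wrap_executable_code_py_alt
  simp only [pvALoop_eq_foldl]
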